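-- pv_equiv track=rewrite | github.com/Yoriz/advent-of-code-2023 | day12.py | springs_match_contiguous_groups
-- ===== SOURCE A (Python) =====
-- OPERATIONAL = "."
--
-- BROKEN = "#"
--
-- def springs_match_contiguous_groups(springs: str, contiguous_groups: list[int]) -> bool:
--     contiguous_count = 0
--     test_group = []
--     for spring in springs:
--         if spring == BROKEN and contiguous_count == 0:
--             contiguous_count = 1
--             continue
--         if spring == BROKEN and contiguous_count > 0:
--             contiguous_count += 1
--             continue
--         if spring == OPERATIONAL and contiguous_count > 0:
--             test_group.append(contiguous_count)
--             contiguous_count = 0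
--     if contiguous_count > 0:
--         test_group.append(contiguous_count)
--     return test_group == contiguous_groups
-- ===== SOURCE B (Python) =====
-- OPERATIONAL = "."
--
-- BROKEN = "#"
--
-- def springs_match_contiguous_groups(springs: str, contiguous_groups: list[int]) -> bool:
--     test_group = [seg.count(BROKEN) for seg in springs.split(OPERATIONAL) if seg.count(BROKEN) > 0]
--     return test_group == contiguous_groups
-- ===== Notes on version B (the rewrite author's own statement) =====
-- stated objective: idiomatic
-- what changed: Replaced the per-character counter state machine with a partition-then-count pass: split the string on '.' and collect the positive '#'-counts of each segment.
import Mathlib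
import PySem

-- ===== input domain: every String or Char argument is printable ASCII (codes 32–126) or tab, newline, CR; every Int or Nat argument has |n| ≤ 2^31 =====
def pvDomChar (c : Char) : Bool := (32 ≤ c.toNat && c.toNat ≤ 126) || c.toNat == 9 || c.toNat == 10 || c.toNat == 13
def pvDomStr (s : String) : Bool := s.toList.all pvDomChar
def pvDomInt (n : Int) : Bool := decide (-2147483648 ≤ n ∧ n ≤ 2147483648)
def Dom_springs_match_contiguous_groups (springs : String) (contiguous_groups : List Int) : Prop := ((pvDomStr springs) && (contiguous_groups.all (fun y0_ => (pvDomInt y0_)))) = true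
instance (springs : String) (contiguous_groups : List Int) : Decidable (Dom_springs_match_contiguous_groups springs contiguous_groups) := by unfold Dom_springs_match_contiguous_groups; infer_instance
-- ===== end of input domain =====

-- B replaces A's per-character counter state machine by split-on-'.' then count '#' per segment (idiomatic; same asymptotic cost).

-- ===== PORT A =====
-- loop body of A, named: the three if/continue branches in order
def pvStepA (s : Int × List Int) (spring : Char) : Int × List Int :=
  if spring = '#' ∧ s.1 = 0 then ((1 : Int), s.2)
  else if spring = '#' ∧ s.1 > 0 then (s.1 + 1, s.2)
  else if spring = '.' ∧ s.1 > 0 then ((0 : Int), s.2 ++ [s.1])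
  else s

def springs_match_contiguous_groups (springs : String) (contiguous_groups : List Int) : Bool :=
  let st := springs.toList.foldl pvStepA ((0 : Int), ([] : List Int))
  let test_group := if st.1 > 0 then st.2 ++ [st.1] else st.2
  decide (test_group = contiguous_groups)

-- ===== PORT B =====
def springs_match_contiguous_groups_alt (springs : String) (contiguous_groups : List Int) : Bool :=
  -- comprehension over springs.split(".") keeping positive '#'-counts
  let test_group := (PySem.Chars.splitOn springs.toList ['.']).foldl
      (fun (acc : List Int) seg =>
        if ((PySem.Chars.count seg ['#'] : Nat) : Int) > 0
        then acc ++ [((PySem.Chars.count seg ['#'] : Nat) : Int)] else acc) ([] : List Int)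
  decide (test_group = contiguous_groups)

-- ===== PRECONDITION & SPEC =====
def Spec_springs_match_contiguous_groups (springs : String) (contiguous_groups : List Int) (out : Bool) : Prop := out = springs_match_contiguous_groups_alt springs contiguous_groups
instance (springs : String) (contiguous_groups : List Int) (out : Bool) : Decidable (Spec_springs_match_contiguous_groups springs contiguous_groups out) := by unfold Spec_springs_match_contiguous_groups; infer_instance

-- ===== CLAIM (what is proved, stated in full; the proofs are below) =====
def Claim_equal_springs_match_contiguous_groups : Prop := ∀ (springs : String) (contiguous_groups : List Int), Dom_springs_match_contiguous_groups springs contiguous_groups → Spec_springs_match_contiguous_groups springs contiguous_groups (springs_match_contiguous_groups springs contiguous_groups)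

-- ===== LEMMAS AND PROOFS =====

-- reference splitter: Python's s.split(".") on a char list (first segment grows at the head)
def pvSegs : List Char → List (List Char)
  | [] => [[]]
  | c :: rest =>
    match pvSegs rest with
    | h :: t => if c = '.' then [] :: h :: t else (c :: h) :: t
    | [] => []

lemma pvSegs_ne_nil (cs : List Char) : pvSegs cs ≠ [] := by
  induction cs with
  | nil => simp [pvSegs]
  | cons c rest ih =>
    cases h : pvSegs rest with
    | nil => exact absurd h ih
    | cons a t => simp [pvSegs, h]; split <;> simp

-- PySem.Chars.count with a single-character needle is List.count (no such lemma in the prelude)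
lemma count_go_hash (fuel : Nat) : ∀ (l : List Char) (acc : Nat), l.length ≤ fuel →
    PySem.Chars.count.go ['#'] fuel l acc = acc + l.count '#' := by
  induction fuel with
  | zero => intro l acc h; cases l with
    | nil => simp [PySem.Chars.count.go]
    | cons c t => simp at h
  | succ f ih =>
    intro l acc h
    cases l with
    | nil => simp [PySem.Chars.count.go]
    | cons c t =>
      simp only [List.length_cons] at h
      by_cases hc : c = '#'
      · subst hc
        rw [show PySem.Chars.count.go ['#'] (f+1) ('#' :: t) acc
              = PySem.Chars.count.go ['#'] f t (acc + 1) by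
            simp [PySem.Chars.count.go, List.isPrefixOf]]
        rw [ih t (acc + 1) (by omega)]
        simp; omega
      · rw [show PySem.Chars.count.go ['#'] (f+1) (c :: t) acc
              = PySem.Chars.count.go ['#'] f t acc by
            simp [PySem.Chars.count.go, List.isPrefixOf]
            intro h; exact absurd h.symm hc]
        rw [ih t acc (by omega)]
        simp [hc]

lemma count_hash (l : List Char) : PySem.Chars.count l ['#'] = l.count '#' := by
  simpa [PySem.Chars.count] using count_go_hash l.length l 0 le_rfl

-- PySem.Chars.splitOn with separator "." is pvSegs (no splitOn lemma exists in the prelude)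
lemma splitOn_go_dot (fuel : Nat) : ∀ (l cur : List Char) (acc : List (List Char)),
    l.length ≤ fuel →
    PySem.Chars.splitOn.go ['.'] fuel l cur acc
      = acc.reverse ++ (match pvSegs l with
          | h :: t => (cur.reverse ++ h) :: t
          | [] => []) := by
  induction fuel with
  | zero =>
    intro l cur acc h
    cases l with
    | nil => simp [PySem.Chars.splitOn.go, pvSegs]
    | cons c t => simp at h
  | succ f ih =>
    intro l cur acc h
    cases l with
    | nil => simp [PySem.Chars.splitOn.go, pvSegs]
    | cons c t =>
      simp only [List.length_cons] at h
      cases hs : pvSegs t with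
      | nil => exact absurd hs (pvSegs_ne_nil t)
      | cons sh st =>
        by_cases hc : c = '.'
        · subst hc
          rw [show PySem.Chars.splitOn.go ['.'] (f+1) ('.' :: t) cur acc
                = PySem.Chars.splitOn.go ['.'] f t [] (cur.reverse :: acc) by
              simp [PySem.Chars.splitOn.go, List.isPrefixOf]]
          rw [ih t [] (cur.reverse :: acc) (by omega)]
          simp [pvSegs, hs]
        · rw [show PySem.Chars.splitOn.go ['.'] (f+1) (c :: t) cur acc
                = PySem.Chars.splitOn.go ['.'] f t (c :: cur) acc by
              simp [PySem.Chars.splitOn.go, List.isPrefixOf]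
              intro h; exact absurd h.symm hc]
          rw [ih t (c :: cur) acc (by omega)]
          simp [pvSegs, hs, hc]

lemma splitOn_dot (l : List Char) : PySem.Chars.splitOn l ['.'] = pvSegs l := by
  rw [PySem.Chars.splitOn, splitOn_go_dot (l.length + 1) l [] [] (by omega)]
  cases hs : pvSegs l with
  | nil => exact absurd hs (pvSegs_ne_nil l)
  | cons h t => simp

-- the positive counts of a segment list (B's comprehension, as a recursion)
def pvCounts : List (List Char) → List Int
  | [] => []
  | h :: t => (if (0 : Int) < (h.count '#' : Nat) then [((h.count '#' : Nat) : Int)] else []) ++ pvCounts t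

lemma alt_fold_eq (ss : List (List Char)) : ∀ (acc : List Int),
    ss.foldl (fun (acc : List Int) seg =>
        if ((PySem.Chars.count seg ['#'] : Nat) : Int) > 0
        then acc ++ [((PySem.Chars.count seg ['#'] : Nat) : Int)] else acc) acc
      = acc ++ pvCounts ss := by
  induction ss with
  | nil => intro acc; simp [pvCounts]
  | cons h t ih =>
    intro acc
    simp only [List.foldl_cons]
    rw [ih]
    simp only [pvCounts, count_hash, gt_iff_lt]
    split_ifs <;> simp

-- finishing step of A (append the pending counter)
def pvFinish (st : Int × List Int) : List Int :=
  if st.1 > 0 then st.2 ++ [st.1] else st.2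

-- A:s state machine, run from counter k ≥ 0, yields acc ++ (k merged into the first segment count)
lemma a_fold_eq (cs : List Char) : ∀ (k : Int) (acc : List Int), 0 ≤ k →
    pvFinish (cs.foldl pvStepA (k, acc))
      = acc ++ (match pvSegs cs with
          | h :: t => (if 0 < k + (h.count '#' : Nat) then [k + ((h.count '#' : Nat) : Int)] else []) ++ pvCounts t
          | [] => []) := by
  induction cs with
  | nil =>
    intro k acc hk
    simp only [List.foldl_nil, pvSegs, List.count_nil, pvFinish]
    by_cases h : (0 : Int) < k <;> simp [h, pvCounts]
  | cons c rest ih =>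
    intro k acc hk
    cases hs : pvSegs rest with
    | nil => exact absurd hs (pvSegs_ne_nil rest)
    | cons sh st =>
      simp only [List.foldl_cons]
      by_cases hcb : c = '#'
      · subst hcb
        by_cases hz : k = 0
        · subst hz
          rw [show pvStepA ((0 : Int), acc) '#' = ((1 : Int), acc) by simp [pvStepA]]
          rw [ih 1 acc (by omega)]
          simp only [pvSegs, hs, if_neg (show ¬('#' : Char) = '.' by decide), List.count_cons_self]
          have h1 : (0 : Int) < 1 + (sh.count '#' : Nat) := by positivity
          have h2 : (0 : Int) < 0 + ((sh.count '#' + 1 : Nat) : Int) := by push_cast; omega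
          simp only [h1, h2, if_pos]
          have e : (1 : Int) + ((sh.count '#' : Nat) : Int) = 0 + (((sh.count '#' + 1 : Nat)) : Int) := by push_cast; ring
          rw [e]
        · have hkpos : (0 : Int) < k := lt_of_le_of_ne hk (Ne.symm hz)
          rw [show pvStepA (k, acc) '#' = (k + 1, acc) by simp [pvStepA, hz, hkpos]]
          rw [ih (k + 1) acc (by omega)]
          simp only [pvSegs, hs, if_neg (show ¬('#' : Char) = '.' by decide), List.count_cons_self]
          have h1 : (0 : Int) < k + 1 + (sh.count '#' : Nat) := by positivity
          have h2 : (0 : Int) < k + ((sh.count '#' + 1 : Nat) : Int) := by push_cast; omega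
          simp only [h1, h2, if_pos]
          have e : k + (1 : Int) + ((sh.count '#' : Nat) : Int) = k + (((sh.count '#' + 1 : Nat)) : Int) := by push_cast; ring
          rw [e]
      · by_cases hcd : c = '.'
        · subst hcd
          by_cases hkpos : (0 : Int) < k
          · rw [show pvStepA (k, acc) '.' = ((0 : Int), acc ++ [k]) by
                simp [pvStepA, hkpos]]
            rw [ih 0 (acc ++ [k]) le_rfl]
            simp [pvSegs, hs, hkpos, pvCounts]
          · have hz : k = 0 := by omega
            subst hz
            rw [show pvStepA ((0 : Int), acc) '.' = ((0 : Int), acc) by simp [pvStepA]]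
            rw [ih 0 acc le_rfl]
            simp [pvSegs, hs, pvCounts]
        · rw [show pvStepA (k, acc) c = (k, acc) by simp [pvStepA, hcb, hcd]]
          rw [ih k acc hk]
          simp [pvSegs, hs, hcd, hcb]

-- ===== VERDICT (by name: the statement is the Claim_ definition above) =====
theorem springs_match_contiguous_groups_spec : Claim_equal_springs_match_contiguous_groups := by
  intro springs cgs _
  unfold Spec_springs_match_contiguous_groups
  unfold springs_match_contiguous_groups springs_match_contiguous_groups_alt
  rw [splitOn_dot, alt_fold_eq]
  have h := a_fold_eq springs.toList 0 [] le_rfl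
  simp only [pvFinish] at h
  simp only []
  rw [h]
  cases hs : pvSegs springs.toList with
  | nil => exact absurd hs (pvSegs_ne_nil springs.toList)
  | cons sh st => simp [pvCounts]
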